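-- pv_equiv track=rewrite | github.com/XGeffrier/FausseCommune | back/markov_model.py | _nicer_output_name
-- ===== SOURCE A (Python) =====
-- def _nicer_output_name(name: str) -> str:
--     """
--     Improve the output name to make it more realistic for France.
--     """
--     LOWERCASE_WORDS = ('a', 'au', 'aux', 'd', 'de', 'del', 'dels', 'derriere', 'des', 'deux', 'devant', 'di', 'dit',
--                        'du', 'en', 'entre', 'environs', 'es', 'es', 'et', 'ez', 'h', 'huis', 'l', 'la', 'las', 'le',
--                        'les', 'les', 'lez', 'nouvelle', 'o', 'plages', 'pres', 'sans', 'ses', 'sous', 'sur')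
--     words = name.split()
--
--     # la ferté sur loing -> La Ferté sur Loing
--     words = [word.title()
--              if (len(word) > 2 and word not in LOWERCASE_WORDS) or i == 0
--              else word
--              for i, word in enumerate(words)]
--
--     # les -> lès
--     if "les" in words:
--         words = words[0:1] + list(map(lambda x: x.replace('les', 'lès'), words[1:]))
--
--     # Saint Martin l Abbaye -> Saint Martin l'Abbaye
--     to_merge = [ix for ix, word in enumerate(words) if len(word) == 1 and ix < len(words) - 1]
--     for ix in to_merge[::-1]:
--         words[ix] = "'".join((words[ix], words[ix + 1]))
--         del words[ix + 1]
--
--     # Saint Michel sur Garonne -> Saint-Michel-sur-Garonne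
--     name = '-'.join(words)
--
--     return name
-- ===== SOURCE B (Python) =====
-- def _nicer_output_name(name: str) -> str:
--     """Single accumulator pass: per-word title/les transforms are done inline
--     while the output string is built directly, with the separator after a word
--     chosen from that word's length ("'" after a single letter, '-' otherwise);
--     the les->les-grave trigger is read off the split words themselves."""
--     LOWERCASE_WORDS = ('a', 'au', 'aux', 'd', 'de', 'del', 'dels', 'derriere', 'des', 'deux', 'devant', 'di', 'dit',
--                        'du', 'en', 'entre', 'environs', 'es', 'es', 'et', 'ez', 'h', 'huis', 'l', 'la', 'las', 'le',
--                        'les', 'les', 'lez', 'nouvelle', 'o', 'plages', 'pres', 'sans', 'ses', 'sous', 'sur')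
--     words = name.split()
--     subst = "les" in words[1:]
--     res = ""
--     prev_single = False
--     for i, w in enumerate(words):
--         t = w.title() if (len(w) > 2 and w not in LOWERCASE_WORDS) or i == 0 else w
--         if subst and i > 0:
--             t = t.replace('les', 'lès')
--         if i == 0:
--             res = t
--         else:
--             res += ("'" if prev_single else "-") + t
--         prev_single = len(t) == 1
--     return res
-- ===== Notes on version B (the rewrite author's own statement) =====
-- stated objective: simpler
-- what changed: A's three staged list passes (title-case map, conditional les-replace over a slice, then a merge-index pass that reverse-iterates joining/deleting single-letter words before a '-'.join) are fused into one accumulator loop that transforms each word inline and appends it with a separator chosen from the previous emitted word's length, the les trigger being read directly off the split words ("les" in words[1:]), which is proved equal to A's membership test on the titled list.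
import Mathlib
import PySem

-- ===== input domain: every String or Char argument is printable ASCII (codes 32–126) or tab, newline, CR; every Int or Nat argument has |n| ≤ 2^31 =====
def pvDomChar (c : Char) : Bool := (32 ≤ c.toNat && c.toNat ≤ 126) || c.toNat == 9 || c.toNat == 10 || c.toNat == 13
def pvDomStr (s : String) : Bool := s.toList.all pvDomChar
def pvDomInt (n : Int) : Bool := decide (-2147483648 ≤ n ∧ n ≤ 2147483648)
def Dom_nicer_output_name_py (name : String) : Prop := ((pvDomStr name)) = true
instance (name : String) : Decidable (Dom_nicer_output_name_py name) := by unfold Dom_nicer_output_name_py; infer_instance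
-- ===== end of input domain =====

-- B replaces A's three list passes (title-map, les-replace on a slice, merge-index pass with
-- in-place join/delete then '-'.join) by ONE accumulator pass that transforms each word inline
-- and appends it with a separator chosen from the previous emitted word's length; objective: simpler.

-- LOWERCASE_WORDS tuple (the same constant appears in both Python sources)
def pyLowercaseWords : List String :=
  ["a", "au", "aux", "d", "de", "del", "dels", "derriere", "des", "deux", "devant", "di", "dit",
   "du", "en", "entre", "environs", "es", "es", "et", "ez", "h", "huis", "l", "la", "las", "le",
   "les", "les", "lez", "nouvelle", "o", "plages", "pres", "sans", "ses", "sous", "sur"]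

-- hand port of str.title() (no PySem primitive; called by both Pythons): a letter after a
-- non-letter is uppercased, any other letter lowercased; exact on the ASCII domain.
def pyTitleChars (prevAlpha : Bool) : List Char → List Char
  | [] => []
  | c :: cs =>
    if PySem.Chars.isalpha c then
      (if prevAlpha then PySem.Chars.lowerChar c else PySem.Chars.upperChar c) :: pyTitleChars true cs
    else c :: pyTitleChars false cs

def pyTitle (s : String) : String := String.ofList (pyTitleChars false s.toList)

-- ===== PORT A =====

-- A's title-case comprehension
def pyTitleWords (ws : List String) : List String :=
  (PySem.List.enumerate ws).map (fun iw =>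
    if (decide (2 < PySem.Str.len iw.2) && !(pyLowercaseWords.contains iw.2)) || (iw.1 == 0)
    then pyTitle iw.2 else iw.2)

-- A's les→lès step
def pyLesWords (ws : List String) : List String :=
  if ws.contains "les"
  then PySem.List.slice ws (some 0) (some 1) ++
       (PySem.List.slice ws (some 1) none).map (fun w => PySem.Str.replace w "les" "lès")
  else ws

-- body of A's merge loop: words[ix] = "'".join((words[ix], words[ix+1])); del words[ix+1].
-- ix comes from enumerate, so 0 ≤ ix and ix+1 < len(words): toNat is exact and the getD default is never read.
def pyMergeStep (ws : List String) (ix : Int) : List String :=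
  (ws.set ix.toNat (PySem.Str.join "'" [PySem.List.pyGetD ws ix "", PySem.List.pyGetD ws (ix + 1) ""])).eraseIdx
    (ix.toNat + 1)

def nicer_output_name_py (name : String) : String :=
  let words0 := PySem.Str.split₀ name
  let words1 := pyTitleWords words0
  let words2 := pyLesWords words1
  let toMerge := ((PySem.List.enumerate words2).filter
      (fun iw => (PySem.Str.len iw.2 == 1) && decide (iw.1 < PySem.List.len words2 - 1))).map (fun iw => iw.1)
  -- for ix in to_merge[::-1]  ([::-1] = reverse)
  let merged := toMerge.reverse.foldl pyMergeStep words2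
  PySem.Str.join "-" merged

-- ===== PORT B =====

-- one iteration of B's loop over (i, w): transform the word inline, then emit it after the
-- separator chosen from the prev_single flag; the new flag is len(t) == 1
def altStep (subst : Bool) (acc : String × Bool) (iw : Int × String) : String × Bool :=
  let t0 := if (decide (2 < PySem.Str.len iw.2) && !(pyLowercaseWords.contains iw.2)) || (iw.1 == 0)
            then pyTitle iw.2 else iw.2
  let t := if subst && decide (0 < iw.1) then PySem.Str.replace t0 "les" "lès" else t0
  (if iw.1 == 0 then t else acc.1 ++ ((if acc.2 then "'" else "-") ++ t), PySem.Str.len t == 1)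

def nicer_output_name_py_alt (name : String) : String :=
  let words := PySem.Str.split₀ name
  let subst := (PySem.List.slice words (some 1) none).contains "les"
  ((PySem.List.enumerate words).foldl (altStep subst) ("", false)).1

-- ===== PRECONDITION & SPEC =====
def Spec_nicer_output_name_py (name : String) (out : String) : Prop := out = nicer_output_name_py_alt name
instance (name : String) (out : String) : Decidable (Spec_nicer_output_name_py name out) := by unfold Spec_nicer_output_name_py; infer_instance

-- ===== CLAIM (what is proved, stated in full; the proofs are below) =====
def Claim_equal_nicer_output_name_py : Prop := ∀ (name : String), Dom_nicer_output_name_py name → Spec_nicer_output_name_py name (nicer_output_name_py name)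

-- ===== LEMMAS AND PROOFS =====

-- A's merge pass abbreviated for the proofs
def pyToMerge (ws : List String) : List Int :=
  ((PySem.List.enumerate ws).filter
    (fun iw => (PySem.Str.len iw.2 == 1) && decide (iw.1 < PySem.List.len ws - 1))).map (fun iw => iw.1)

def pyMergeAll (ws : List String) : List String := (pyToMerge ws).reverse.foldl pyMergeStep ws

-- structural description of the merge pass
def mSpec : List String → List String
  | [] => []
  | [w] => [w]
  | w :: x :: ws =>
    match mSpec (x :: ws) with
    | [] => [w]
    | y :: ys => if PySem.Str.len w == 1 then (w ++ "'" ++ y) :: ys else w :: y :: ys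

-- the tail of the output, described recursively: separator chosen from the prev_single flag
def gJoinB (b : Bool) : List String → String
  | [] => ""
  | x :: xs => (if b then "'" else "-") ++ x ++ gJoinB (PySem.Str.len x == 1) xs

-- the transform B applies to a word at index ≥ 1
def twTail (w : String) : String :=
  if decide (2 < PySem.Str.len w) && !(pyLowercaseWords.contains w) then pyTitle w else w

def gtTail (subst : Bool) (w : String) : String :=
  if subst then PySem.Str.replace (twTail w) "les" "lès" else twTail w

theorem enumerate_shift {α : Type} (xs : List α) (s : Int) :
    PySem.List.enumerate xs (s + 1) = (PySem.List.enumerate xs s).map (fun p => (p.1 + 1, p.2)) := by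
  induction xs generalizing s with
  | nil => simp [PySem.List.enumerate_nil]
  | cons x t ih => simp [PySem.List.enumerate_cons, ih (s + 1)]

theorem toMerge_cons (w : String) (ws : List String) :
    pyToMerge (w :: ws) =
      (if (PySem.Str.len w == 1) && decide (0 < (ws.length : Int)) then [(0 : Int)] else []) ++
        (pyToMerge ws).map (· + 1) := by
  unfold pyToMerge
  rw [PySem.List.enumerate_cons, enumerate_shift]
  rw [List.filter_cons]
  rw [List.filter_map]
  have hc : ∀ a ∈ PySem.List.enumerate ws 0,
      ((fun iw => (PySem.Str.len iw.2 == 1) && decide (iw.1 < PySem.List.len (w :: ws) - 1)) ∘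
        (fun p => (p.1 + 1, p.2))) a
      = (fun iw => (PySem.Str.len iw.2 == 1) && decide (iw.1 < PySem.List.len ws - 1)) a := by
    intro a _
    simp only [Function.comp_apply, PySem.List.len, List.length_cons]
    congr 1
    rw [decide_eq_decide]
    push_cast
    omega
  rw [List.filter_congr hc]
  by_cases h : w.length = 1 ∧ 0 < ws.length
  · simp [PySem.Str.len_eq, PySem.List.len, h, List.map_map, Function.comp_def]
  · simp [PySem.Str.len_eq, PySem.List.len, h, List.map_map, Function.comp_def]

theorem toMerge_nonneg (ws : List String) : ∀ i ∈ pyToMerge ws, 0 ≤ i := by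
  induction ws with
  | nil => intro i hi; simp [pyToMerge, PySem.List.enumerate_nil] at hi
  | cons w t ih =>
    intro i hi
    rw [toMerge_cons] at hi
    rcases List.mem_append.1 hi with h | h
    · split at h <;> simp at h
      omega
    · obtain ⟨j, hj, rfl⟩ := List.mem_map.1 h
      have := ih j hj
      omega

theorem mergeStep_cons (w : String) (ws : List String) (i : Int) (hi : 0 ≤ i) :
    pyMergeStep (w :: ws) (i + 1) = w :: pyMergeStep ws i := by
  obtain ⟨n, rfl⟩ := Int.eq_ofNat_of_zero_le hi
  unfold pyMergeStep
  have h2 : (((n + 1 : Nat) : Int) + 1) = (((n + 2 : Nat) : Int)) := by push_cast; ring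
  have h1 : ((n : Int) + 1) = (((n + 1 : Nat) : Int)) := by push_cast; ring
  rw [h1, h2]
  simp only [PySem.List.pyGetD_natCast, Int.toNat_natCast, List.getD_cons_succ,
    List.set_cons_succ, List.eraseIdx_cons_succ]

theorem foldl_mergeStep_shift (l : List Int) (hl : ∀ i ∈ l, 0 ≤ i) (w : String) (ws : List String) :
    (l.map (· + 1)).foldl pyMergeStep (w :: ws) = w :: l.foldl pyMergeStep ws := by
  induction l generalizing ws with
  | nil => rfl
  | cons i t ih =>
    simp only [List.map_cons, List.foldl_cons]
    rw [mergeStep_cons w ws i (hl i (by simp))]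
    exact ih (fun j hj => hl j (by simp [hj])) _

theorem strJoin_singleton (sep a : String) : PySem.Str.join sep [a] = a := by
  apply String.toList_injective
  simp [PySem.Str.toList_join, PySem.Chars.join_singleton]

theorem strJoin_cons_cons (sep a b : String) (r : List String) :
    PySem.Str.join sep (a :: b :: r) = a ++ sep ++ PySem.Str.join sep (b :: r) := by
  apply String.toList_injective
  simp [PySem.Str.toList_join, PySem.Chars.join_cons_cons, String.toList_append]

theorem strJoin_cons_append (sep a b : String) (r : List String) :
    PySem.Str.join sep ((a ++ b) :: r) = a ++ PySem.Str.join sep (b :: r) := by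
  cases r with
  | nil => rw [strJoin_singleton, strJoin_singleton]
  | cons q qs =>
    rw [strJoin_cons_cons, strJoin_cons_cons]
    apply String.toList_injective
    simp [String.toList_append]

theorem strJoin_nil (sep : String) : PySem.Str.join sep [] = "" := by
  apply String.toList_injective
  simp [PySem.Str.toList_join, PySem.Chars.join_nil]

theorem strJoin_pair (sep a b : String) : PySem.Str.join sep [a, b] = a ++ sep ++ b := by
  apply String.toList_injective
  simp [PySem.Str.toList_join, PySem.Chars.join_cons_cons, PySem.Chars.join_singleton,
    String.toList_append]

theorem mSpec_ne_nil (w : String) (ws : List String) : mSpec (w :: ws) ≠ [] := by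
  cases ws with
  | nil => simp [mSpec]
  | cons x xs =>
    simp only [mSpec]
    rcases mSpec (x :: xs) with _ | ⟨y, ys⟩
    · simp
    · dsimp only; split <;> simp

theorem mergeAll_cons (w : String) (ws : List String) :
    pyMergeAll (w :: ws) =
      if (PySem.Str.len w == 1) && decide (0 < (ws.length : Int)) then
        pyMergeStep (w :: pyMergeAll ws) 0
      else w :: pyMergeAll ws := by
  unfold pyMergeAll
  rw [toMerge_cons, List.reverse_append, ← List.map_reverse, List.foldl_append]
  rw [foldl_mergeStep_shift _ (fun i hi => toMerge_nonneg ws i (List.mem_reverse.1 hi))]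
  split
  · rfl
  · rfl

theorem mergeAll_eq_mSpec (ws : List String) : pyMergeAll ws = mSpec ws := by
  induction ws with
  | nil => simp [pyMergeAll, pyToMerge, PySem.List.enumerate_nil, mSpec]
  | cons w t ih =>
    rw [mergeAll_cons, ih]
    cases t with
    | nil => simp [mSpec]
    | cons x xs =>
      obtain ⟨y, ys, hM⟩ := List.exists_cons_of_ne_nil (mSpec_ne_nil x xs)
      simp only [mSpec, hM]
      have hstep : pyMergeStep (w :: y :: ys) 0 = (w ++ "'" ++ y) :: ys := by
        simp [pyMergeStep, PySem.List.pyGetD, strJoin_pair]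
      by_cases hw : w.length = 1
      · simp [PySem.Str.len_eq, hw, hstep]
      · simp [PySem.Str.len_eq, hw]

theorem joinDash_mSpec (w : String) (ws : List String) :
    PySem.Str.join "-" (mSpec (w :: ws)) = w ++ gJoinB (PySem.Str.len w == 1) ws := by
  induction ws generalizing w with
  | nil => simp [mSpec, strJoin_singleton, gJoinB]
  | cons x xs ih =>
    obtain ⟨y, ys, hM⟩ := List.exists_cons_of_ne_nil (mSpec_ne_nil x xs)
    simp only [mSpec, hM]
    by_cases hw : w.length = 1
    · have hb : (PySem.Str.len w == 1) = true := by simp [PySem.Str.len_eq, hw]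
      simp only [hb, if_true]
      rw [strJoin_cons_append "-" (w ++ "'") y ys, ← hM, ih]
      apply String.toList_injective
      simp [String.toList_append, gJoinB]
    · have hb : (PySem.Str.len w == 1) = false := by simp [PySem.Str.len_eq, hw]
      simp only [hb, Bool.false_eq_true, if_false]
      rw [strJoin_cons_cons, ← hM, ih]
      apply String.toList_injective
      simp [String.toList_append, gJoinB]

-- upperChar never yields the lowercase letter 'l' (it uppercases a-z and fixes the rest)
theorem upperChar_ne_l (c : Char) (h : PySem.Chars.isalpha c = true) : PySem.Chars.upperChar c ≠ 'l' := by
  intro hc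
  simp only [PySem.Chars.isalpha, PySem.Chars.isupper, PySem.Chars.islower, Bool.or_eq_true,
    Bool.and_eq_true, decide_eq_true_eq, Char.le_def] at h
  unfold PySem.Chars.upperChar at hc
  split_ifs at hc with hl
  · simp only [PySem.Chars.islower, Bool.and_eq_true, decide_eq_true_eq, Char.le_def] at hl
    have h1 : 97 ≤ c.toNat := hl.1
    have h2 : c.toNat ≤ 122 := hl.2
    have hthis := congrArg Char.toNat hc
    rw [Char.toNat_ofNat] at hthis
    have hv : (c.toNat - 32).isValidChar := by constructor; omega
    rw [if_pos hv] at hthis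
    have hl108 : ('l').toNat = 108 := by decide
    rw [hl108] at hthis
    omega
  · subst hc
    simp only [PySem.Chars.islower, Bool.and_eq_true, decide_eq_true_eq] at hl
    rcases h with h | h
    · rcases h with ⟨h3, h4⟩; revert h4; decide
    · exact hl ⟨by decide, by decide⟩

-- str.title never yields the all-lowercase word "les"
theorem title_ne_les (w : String) : pyTitle w ≠ "les" := by
  intro h
  have h' : pyTitleChars false w.toList = "les".toList := by
    have := congrArg String.toList h
    simpa [pyTitle] using this
  cases hw : w.toList with
  | nil => rw [hw] at h'; simp [pyTitleChars] at h'
  | cons c cs =>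
    rw [hw] at h'
    by_cases hA : PySem.Chars.isalpha c = true
    · simp only [pyTitleChars, hA, if_true] at h'
      have hc : PySem.Chars.upperChar c = 'l' := by
        have := congrArg (fun l => l.head?) h'
        simpa using this
      exact upperChar_ne_l c hA hc
    · simp only [pyTitleChars, hA] at h'
      have hc : c = 'l' := by
        have := congrArg (fun l => l.head?) h'
        simpa using this
      subst hc
      exact hA (by decide)

-- the transform at index ≥ 1 returns "les" exactly on the word "les"
theorem twTail_eq_les (w : String) : twTail w = "les" ↔ w = "les" := by
  unfold twTail
  split_ifs with h
  · constructor
    · intro hc; exact absurd hc (title_ne_les w)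
    · intro hw; subst hw; simp [pyLowercaseWords] at h
  · exact Iff.rfl

-- A's title comprehension, split into head and tail
theorem titleWords_tail (ws : List String) (s : Int) (hs : 1 ≤ s) :
    (PySem.List.enumerate ws s).map (fun iw =>
        if (decide (2 < PySem.Str.len iw.2) && !(pyLowercaseWords.contains iw.2)) || (iw.1 == 0)
        then pyTitle iw.2 else iw.2)
      = ws.map twTail := by
  induction ws generalizing s with
  | nil => simp [PySem.List.enumerate_nil]
  | cons w t ih =>
    rw [PySem.List.enumerate_cons]
    simp only [List.map_cons]
    have h0 : (s == 0) = false := by simp; omega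
    rw [ih (s + 1) (by omega)]
    simp [twTail, h0]

theorem titleWords_cons (w : String) (ws : List String) :
    pyTitleWords (w :: ws) = pyTitle w :: ws.map twTail := by
  unfold pyTitleWords
  rw [PySem.List.enumerate_cons]
  simp only [List.map_cons]
  rw [titleWords_tail ws (0 + 1) (by omega)]
  simp

-- the les trigger on the transformed list equals the trigger B reads off the raw tail
theorem contains_titled (w : String) (ws : List String) :
    (pyTitle w :: ws.map twTail).contains "les" = ws.contains "les" := by
  simp only [List.contains_cons]
  have hh : ("les" == pyTitle w) = false := by
    simp only [beq_eq_false_iff_ne, ne_eq]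
    exact fun he => title_ne_les w he.symm
  rw [hh, Bool.false_or]
  induction ws with
  | nil => rfl
  | cons x t ih =>
    simp only [List.map_cons, List.contains_cons, ih]
    congr 1
    by_cases hx : x = "les"
    · subst hx
      rw [(twTail_eq_les _).2 rfl]
    · have hne : twTail x ≠ "les" := fun hc => hx ((twTail_eq_les x).1 hc)
      simp [Ne.symm hx, Ne.symm hne]

-- the stage composition on a nonempty word list, as seen by B
theorem stages_cons (w : String) (ws : List String) :
    pyLesWords (pyTitleWords (w :: ws)) = pyTitle w :: ws.map (gtTail (ws.contains "les")) := by
  rw [titleWords_cons]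
  unfold pyLesWords
  rw [contains_titled]
  by_cases h : ws.contains "les" = true
  · simp only [h]
    rw [if_pos trivial]
    rw [PySem.List.slice_zero_start, PySem.List.slice_from_one]
    rw [PySem.List.slice_to _ (by norm_num : (0:Int) ≤ 1)]
    simp [gtTail, List.map_map, Function.comp_def]
  · rw [Bool.not_eq_true] at h
    simp only [h]
    rw [if_neg (by simp)]
    simp [gtTail]

-- B's fold on the tail produces the separator-joined string
theorem foldl_altStep_tail (subst : Bool) (ws : List String) (s : Int) (hs : 1 ≤ s)
    (acc : String) (b : Bool) :
    ((PySem.List.enumerate ws s).foldl (altStep subst) (acc, b)).1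
      = acc ++ gJoinB b (ws.map (gtTail subst)) := by
  induction ws generalizing s acc b with
  | nil => simp [PySem.List.enumerate_nil, gJoinB]
  | cons w t ih =>
    rw [PySem.List.enumerate_cons]
    simp only [List.foldl_cons]
    have h0 : (s == 0) = false := by simp; omega
    have hp : decide (0 < s) = true := by simp; omega
    simp only [altStep, h0, hp, Bool.and_true]
    rw [ih (s + 1) (by omega)]
    cases subst <;>
      simp [gtTail, twTail, gJoinB, String.append_assoc]

-- the two ports agree
theorem key (words : List String) :
    PySem.Str.join "-" (pyMergeAll (pyLesWords (pyTitleWords words)))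
      = ((PySem.List.enumerate words).foldl
          (altStep ((PySem.List.slice words (some 1) none).contains "les")) ("", false)).1 := by
  cases words with
  | nil =>
    simp [pyTitleWords, pyLesWords, PySem.List.enumerate_nil, pyMergeAll, pyToMerge]
    exact strJoin_nil "-"
  | cons w ws =>
    rw [PySem.List.slice_from_one]
    have hsub : (w :: ws).tail = ws := rfl
    rw [hsub]
    rw [stages_cons, mergeAll_eq_mSpec, joinDash_mSpec]
    rw [PySem.List.enumerate_cons]
    simp only [List.foldl_cons, altStep]
    have h00 : ((0 : Int) == 0) = true := by decide
    have h0p : decide ((0:Int) < 0) = false := by decide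
    simp only [h00, h0p, Bool.and_false, Bool.false_eq_true, if_false, Bool.or_true, if_true]
    rw [foldl_altStep_tail _ ws (0 + 1) (by omega)]

-- ===== VERDICT (by name: the statement is the Claim_ definition above) =====
theorem nicer_output_name_py_spec : Claim_equal_nicer_output_name_py := by
  intro name _
  unfold Spec_nicer_output_name_py nicer_output_name_py nicer_output_name_py_alt
  exact key (PySem.Str.split₀ name)
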